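-- pv_equiv track=rewrite | github.com/ym1522/Algorithm-study | 김유민/프로그래머스/모의고사_pm.py | solution
-- ===== SOURCE A (Python) =====
-- def solution(answers):
--     s1 = [1,2,3,4,5]
--     s2 = [2,1,2,3,2,4,2,5]
--     s3 = [3,3,1,1,2,2,4,4,5,5]
--     scores = [0, 0, 0]
--
--     for answer in answers:
--         if s1[0] == answer: scores[0] += 1
--         if s2[0] == answer: scores[1] += 1
--         if s3[0] == answer: scores[2] += 1
--
--         s1.append(s1.pop(0))
--         s2.append(s2.pop(0))
--         s3.append(s3.pop(0))
--
--     res = [i+1 for i, score in enumerate(scores) if score == max(scores)]       # 최댓값의 인덱스+1을 res에 저장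
--     res.sort()
--
--     return res
-- ===== SOURCE B (Python) =====
-- def solution(answers):
--     patterns = [[1, 2, 3, 4, 5],
--                 [2, 1, 2, 3, 2, 4, 2, 5],
--                 [3, 3, 1, 1, 2, 2, 4, 4, 5, 5]]
--     scores = [sum(1 for i, a in enumerate(answers) if p[i % len(p)] == a)
--               for p in patterns]
--     best = max(scores)
--     return [k + 1 for k, s in enumerate(scores) if s == best]
-- ===== Notes on version B (the rewrite author's own statement) =====
-- stated objective: idiomatic
-- what changed: Replaced the single loop that mutates three rotating lists via pop(0)/append with three independent scans using modular indexing into static patterns, and dropped the redundant final sort since the indices are produced in order.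
import Mathlib
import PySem

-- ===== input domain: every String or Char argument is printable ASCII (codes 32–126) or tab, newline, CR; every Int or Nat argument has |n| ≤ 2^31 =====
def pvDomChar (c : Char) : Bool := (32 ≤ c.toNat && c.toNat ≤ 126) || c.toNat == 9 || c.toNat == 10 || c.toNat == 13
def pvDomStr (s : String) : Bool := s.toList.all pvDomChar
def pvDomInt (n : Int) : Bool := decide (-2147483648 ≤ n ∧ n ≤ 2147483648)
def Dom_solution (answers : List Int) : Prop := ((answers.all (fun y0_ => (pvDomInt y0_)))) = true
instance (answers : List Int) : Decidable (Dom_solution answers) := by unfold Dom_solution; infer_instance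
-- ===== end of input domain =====

-- B replaces A's single loop over three rotating (pop(0)/append) lists by an independent
-- modular-index scan per fixed pattern, and omits the redundant final sort (idiomatic).

-- ===== PORT A =====
-- s.append(s.pop(0)): move the head to the back (the three pattern lists are never empty,
-- so pop(0) never raises; exact on nonempty lists)
def pvRot (l : List Int) : List Int :=
  match l with
  | [] => []
  | x :: xs => xs ++ [x]

-- one iteration of A's for-loop over the state ((s1,s2,s3),(scores[0],scores[1],scores[2]))
def pvStepA (st : (List Int × List Int × List Int) × (Int × Int × Int)) (a : Int) :
    (List Int × List Int × List Int) × (Int × Int × Int) :=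
  ((pvRot st.1.1, pvRot st.1.2.1, pvRot st.1.2.2),
   ((if PySem.List.pyGetD st.1.1 0 0 = a then st.2.1 + 1 else st.2.1),
    (if PySem.List.pyGetD st.1.2.1 0 0 = a then st.2.2.1 + 1 else st.2.2.1),
    (if PySem.List.pyGetD st.1.2.2 0 0 = a then st.2.2.2 + 1 else st.2.2.2)))

def solution (answers : List Int) : List Int :=
  let st := answers.foldl pvStepA
      (([1,2,3,4,5], [2,1,2,3,2,4,2,5], [3,3,1,1,2,2,4,4,5,5]), (0, 0, 0))
  let scores : List Int := [st.2.1, st.2.2.1, st.2.2.2]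
  -- max(scores): scores is nonempty so Python's max never raises
  let m := (PySem.List.max? scores (fun x => x)).getD 0
  let res := (PySem.List.enumerate scores 0).foldl
      (fun acc p => if p.2 = m then acc ++ [p.1 + 1] else acc) []
  PySem.List.sorted res (fun x => x) false

-- ===== PORT B =====
-- sum(1 for i, a in enumerate(answers) if p[i % len(p)] == a); p[i % len p] is an
-- in-range nonnegative index (p nonempty), ported with pyGetD
def pvScore (answers p : List Int) : Int :=
  (PySem.List.enumerate answers 0).foldl
    (fun acc q =>
      if PySem.List.pyGetD p (PySem.Int.mod q.1 (p.length : Int)) 0 = q.2 then acc + 1 else acc) 0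

def solution_alt (answers : List Int) : List Int :=
  let patterns : List (List Int) :=
    [[1,2,3,4,5], [2,1,2,3,2,4,2,5], [3,3,1,1,2,2,4,4,5,5]]
  let scores := patterns.map (fun p => pvScore answers p)
  let best := (PySem.List.max? scores (fun x => x)).getD 0
  (PySem.List.enumerate scores 0).foldl
    (fun acc q => if q.2 = best then acc ++ [q.1 + 1] else acc) []

-- ===== PRECONDITION & SPEC =====
def Spec_solution (answers : List Int) (out : List Int) : Prop := out = solution_alt answers
instance (answers : List Int) (out : List Int) : Decidable (Spec_solution answers out) := by
  unfold Spec_solution; infer_instance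

-- ===== CLAIM (what is proved, stated in full; the proofs are below) =====
def Claim_equal_solution : Prop := ∀ (answers : List Int), Dom_solution answers → Spec_solution answers (solution answers)

-- ===== LEMMAS AND PROOFS =====

-- spec count: matches of answers against p read cyclically starting at offset k
def cntFrom (p : List Int) (k : Nat) : List Int → Int
  | [] => 0
  | a :: as => (if p.getD (k % p.length) 0 = a then 1 else 0) + cntFrom p (k + 1) as

-- A's loop restricted to one rotating list and its counter
def foldOne (l : List Int) (c : Int) (as : List Int) : List Int × Int :=
  as.foldl (fun lc a => (pvRot lc.1, if PySem.List.pyGetD lc.1 0 0 = a then lc.2 + 1 else lc.2)) (l, c)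

theorem pvRot_ne_nil (l : List Int) (h : l ≠ []) : pvRot l ≠ [] := by
  cases l with
  | nil => exact absurd rfl h
  | cons x xs => simp [pvRot]

theorem length_pvRot (l : List Int) : (pvRot l).length = l.length := by
  cases l <;> simp [pvRot]

theorem getD_pvRot (l : List Int) (h : l ≠ []) (k : Nat) :
    (pvRot l).getD (k % l.length) 0 = l.getD ((k + 1) % l.length) 0 := by
  cases l with
  | nil => exact absurd rfl h
  | cons x xs =>
    simp only [pvRot, List.length_cons]
    have hstep : (k + 1) % (xs.length + 1) = (k % (xs.length + 1) + 1) % (xs.length + 1) :=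
      (Nat.mod_add_mod k (xs.length + 1) 1).symm
    have hr : k % (xs.length + 1) < xs.length + 1 := Nat.mod_lt _ (by omega)
    by_cases hrn : k % (xs.length + 1) = xs.length
    · rw [hstep, hrn]
      simp [List.getD]
    · have h2 : k % (xs.length + 1) + 1 < xs.length + 1 := by omega
      rw [hstep, Nat.mod_eq_of_lt h2]
      have h3 : k % (xs.length + 1) < xs.length := by omega
      simp [List.getD, List.getElem?_append_left h3]

theorem cntFrom_pvRot (l : List Int) (h : l ≠ []) (as : List Int) (k : Nat) :
    cntFrom (pvRot l) k as = cntFrom l (k + 1) as := by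
  induction as generalizing k with
  | nil => rfl
  | cons a as ih =>
    simp only [cntFrom, length_pvRot, getD_pvRot l h k, ih]

theorem foldOne_snd (as : List Int) : ∀ (l : List Int) (c : Int), l ≠ [] →
    (foldOne l c as).2 = c + cntFrom l 0 as := by
  induction as with
  | nil => intro l c _; simp [foldOne, cntFrom]
  | cons a as ih =>
    intro l c h
    have step : foldOne l c (a :: as)
        = foldOne (pvRot l) (if PySem.List.pyGetD l 0 0 = a then c + 1 else c) as := by
      simp [foldOne]
    rw [step, ih _ _ (pvRot_ne_nil l h), cntFrom_pvRot l h]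
    have hget : PySem.List.pyGetD l 0 0 = l.getD (0 % l.length) 0 := by
      have : (0 : Nat) % l.length = 0 := by
        cases l with
        | nil => exact absurd rfl h
        | cons x xs => simp
      rw [this]
      simpa using PySem.List.pyGetD_natCast l 0 0
    simp only [cntFrom, ← hget]
    split <;> ring

-- A's fold over the triple state splits into three independent one-list folds
theorem foldl_pvStepA (as : List Int) :
    ∀ (s1 s2 s3 : List Int) (c1 c2 c3 : Int),
    as.foldl pvStepA ((s1, s2, s3), (c1, c2, c3))
      = (((foldOne s1 c1 as).1, (foldOne s2 c2 as).1, (foldOne s3 c3 as).1),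
         ((foldOne s1 c1 as).2, (foldOne s2 c2 as).2, (foldOne s3 c3 as).2)) := by
  induction as with
  | nil => intro s1 s2 s3 c1 c2 c3; simp [foldOne]
  | cons a as ih =>
    intro s1 s2 s3 c1 c2 c3
    simp only [List.foldl_cons, pvStepA, foldOne, ih]

-- B's per-pattern scan computes the same cyclic count
theorem pvScore_cnt (p : List Int) (as : List Int) :
    ∀ (k : Nat) (acc : Int),
    (PySem.List.enumerate as (k : Int)).foldl
      (fun acc q =>
        if PySem.List.pyGetD p (PySem.Int.mod q.1 (p.length : Int)) 0 = q.2 then acc + 1 else acc) acc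
      = acc + cntFrom p k as := by
  induction as with
  | nil => intro k acc; simp [PySem.List.enumerate_nil, cntFrom]
  | cons a as ih =>
    intro k acc
    rw [PySem.List.enumerate_cons]
    simp only [List.foldl_cons]
    have hcast : (k : Int) + 1 = ((k + 1 : Nat) : Int) := by push_cast; ring
    rw [hcast, ih]
    have hmod : PySem.Int.mod (k : Int) (p.length : Int) = ((k % p.length : Nat) : Int) :=
      PySem.Int.mod_natCast k p.length
    have hget : PySem.List.pyGetD p (PySem.Int.mod (k : Int) (p.length : Int)) 0
        = p.getD (k % p.length) 0 := by
      rw [hmod]; simpa using PySem.List.pyGetD_natCast p (k % p.length) 0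
    simp only [cntFrom, hget]
    split <;> ring

theorem pvScore_eq (p : List Int) (as : List Int) :
    pvScore as p = cntFrom p 0 as := by
  have := pvScore_cnt p as 0 0
  simpa [pvScore] using this

-- ===== VERDICT (by name: the statement is the Claim_ definition above) =====
theorem solution_spec : Claim_equal_solution := by
  intro answers _
  unfold Spec_solution solution solution_alt
  rw [foldl_pvStepA]
  simp only [List.map_cons, List.map_nil, pvScore_eq, zero_add,
    foldOne_snd answers [1,2,3,4,5] 0 (by simp),
    foldOne_snd answers [2,1,2,3,2,4,2,5] 0 (by simp),
    foldOne_snd answers [3,3,1,1,2,2,4,4,5,5] 0 (by simp)]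
  simp only [PySem.List.enumerate_cons, PySem.List.enumerate_nil, List.foldl_cons, List.foldl_nil]
  split_ifs <;> decide
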